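-- pv_equiv track=rewrite | github.com/ClyptAI/Clypt-Backend | backend/pipeline/audience/crowd_3_score_windows.py | _align_window
-- ===== SOURCE A (Python) =====
-- MIN_CLIP_MS = 12_000
--
-- MAX_CLIP_MS = 45_000
--
-- def _align_window(words: list[dict], start_ms: int, end_ms: int, duration_ms: int) -> tuple[int, int]:
--     start_ms = max(0, start_ms)
--     end_ms = min(duration_ms or end_ms, end_ms)
--     if end_ms - start_ms < MIN_CLIP_MS:
--         end_ms = min(duration_ms or (start_ms + MIN_CLIP_MS), start_ms + MIN_CLIP_MS)
--     if end_ms - start_ms > MAX_CLIP_MS: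
--         end_ms = start_ms + MAX_CLIP_MS
--
--     nearest_start = start_ms
--     nearest_end = end_ms
--     for word in words:
--         w_start = int(word.get("start_time_ms", 0) or 0)
--         w_end = int(word.get("end_time_ms", w_start) or w_start)
--         if w_start <= start_ms:
--             nearest_start = w_start
--         if w_end <= end_ms:
--             nearest_end = w_end
--         else:
--             break
--
--     if nearest_end - nearest_start < MIN_CLIP_MS:
--         nearest_end = min(duration_ms or (nearest_start + MIN_CLIP_MS), nearest_start + MIN_CLIP_MS)
--     return nearest_start, nearest_end
-- ===== SOURCE B (Python) =====
-- MIN_CLIP_MS = 12_000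
-- MAX_CLIP_MS = 45_000
--
-- def _w_start(word):
--     return int(word.get("start_time_ms", 0) or 0)
--
-- def _w_end(word):
--     ws = _w_start(word)
--     return int(word.get("end_time_ms", ws) or ws)
--
-- def _align_window(words: list, start_ms: int, end_ms: int, duration_ms: int) -> tuple:
--     start_ms = max(0, start_ms)
--     end_ms = min(duration_ms or end_ms, end_ms)
--     if end_ms - start_ms < MIN_CLIP_MS:
--         end_ms = min(duration_ms or (start_ms + MIN_CLIP_MS), start_ms + MIN_CLIP_MS)
--     if end_ms - start_ms > MAX_CLIP_MS:
--         end_ms = start_ms + MAX_CLIP_MS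
--
--     # index of the first word whose end passes the window (A's break point)
--     cut = next((i for i, w in enumerate(words) if _w_end(w) > end_ms), len(words))
--     nearest_end = _w_end(words[cut - 1]) if cut > 0 else end_ms
--     # scan backwards from the break word (inclusive): first start <= start_ms wins
--     nearest_start = next(
--         (_w_start(w) for w in reversed(words[:cut + 1]) if _w_start(w) <= start_ms),
--         start_ms,
--     )
--
--     if nearest_end - nearest_start < MIN_CLIP_MS:
--         nearest_end = min(duration_ms or (nearest_start + MIN_CLIP_MS), nearest_start + MIN_CLIP_MS)
--     return nearest_start, nearest_end
-- ===== Notes on version B (the rewrite author's own statement) =====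
-- stated objective: alternative
-- what changed: A's fused forward loop with break and two running accumulators is replaced by: locate the break index with a first-match search, read nearest_end directly from the word before the break, and find nearest_start by a backward first-match scan over the reversed prefix (last-match-forward becomes first-match-backward); clamp prologue and MIN_CLIP epilogue kept.
import Mathlib
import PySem

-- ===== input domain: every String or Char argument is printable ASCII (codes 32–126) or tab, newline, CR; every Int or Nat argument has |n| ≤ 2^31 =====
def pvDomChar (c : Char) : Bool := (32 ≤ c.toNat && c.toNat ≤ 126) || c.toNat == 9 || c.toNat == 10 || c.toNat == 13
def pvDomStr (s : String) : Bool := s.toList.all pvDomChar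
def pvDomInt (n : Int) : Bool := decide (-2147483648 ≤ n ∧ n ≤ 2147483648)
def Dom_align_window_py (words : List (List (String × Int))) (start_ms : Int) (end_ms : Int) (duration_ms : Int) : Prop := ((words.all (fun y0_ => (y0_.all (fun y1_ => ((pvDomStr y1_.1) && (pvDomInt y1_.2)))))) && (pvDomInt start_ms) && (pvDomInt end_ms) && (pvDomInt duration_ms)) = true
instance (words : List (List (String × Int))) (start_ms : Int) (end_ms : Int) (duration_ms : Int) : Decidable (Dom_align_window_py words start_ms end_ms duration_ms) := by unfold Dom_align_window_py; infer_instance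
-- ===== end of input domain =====

-- B replaces A's fused break-loop by: find the break index (first match), read nearest_end
-- from the word before it, and find nearest_start by a backward first-match scan (alternative decomposition, same cost).

-- ===== PORT A =====
-- dict.get(k, dflt): first match in the association list
def pvGetD (w : List (String × Int)) (k : String) (d : Int) : Int :=
  match w.find? (fun p => p.1 == k) with
  | some p => p.2
  | none => d

-- Python 'x or d' for ints
def pvOrI (x d : Int) : Int := if x = 0 then d else x

def pvWStart (w : List (String × Int)) : Int := pvOrI (pvGetD w "start_time_ms" 0) 0

def pvWEnd (w : List (String × Int)) : Int :=
  pvOrI (pvGetD w "end_time_ms" (pvWStart w)) (pvWStart w)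

-- A's for-loop with break, carrying (nearest_start, nearest_end)
def pvLoopA (s e : Int) : List (List (String × Int)) → Int → Int → Int × Int
  | [], ns, ne => (ns, ne)
  | w :: ws, ns, ne =>
    let ns' := if pvWStart w ≤ s then pvWStart w else ns
    if pvWEnd w ≤ e then pvLoopA s e ws ns' (pvWEnd w) else (ns', ne)

def align_window_py (words : List (List (String × Int))) (start_ms : Int) (end_ms : Int) (duration_ms : Int) : Int × Int :=
  let start1 := max 0 start_ms
  let end1 := min (pvOrI duration_ms end_ms) end_ms
  let end2 := if end1 - start1 < 12000 then min (pvOrI duration_ms (start1 + 12000)) (start1 + 12000) else end1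
  let end3 := if end2 - start1 > 45000 then start1 + 45000 else end2
  let r := pvLoopA start1 end3 words start1 end3
  let ne := if r.2 - r.1 < 12000 then min (pvOrI duration_ms (r.1 + 12000)) (r.1 + 12000) else r.2
  (r.1, ne)

-- ===== PORT B =====
def align_window_py_alt (words : List (List (String × Int))) (start_ms : Int) (end_ms : Int) (duration_ms : Int) : Int × Int :=
  let start1 := max 0 start_ms
  let end1 := min (pvOrI duration_ms end_ms) end_ms
  let end2 := if end1 - start1 < 12000 then min (pvOrI duration_ms (start1 + 12000)) (start1 + 12000) else end1
  let end3 := if end2 - start1 > 45000 then start1 + 45000 else end2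
  -- cut = next((i for i, w in enumerate(words) if _w_end(w) > end_ms), len(words))
  let cut := (words.findIdx? (fun w => decide (end3 < pvWEnd w))).getD words.length
  -- nearest_end = _w_end(words[cut-1]) if cut > 0 else end_ms   (index is in range when cut > 0)
  let nearest_end := if cut = 0 then end3 else pvWEnd (words.getD (cut - 1) [])
  -- nearest_start = next((_w_start(w) for w in reversed(words[:cut+1]) if _w_start(w) <= start_ms), start_ms)
  let nearest_start :=
    (((words.take (cut + 1)).reverse.find? (fun w => decide (pvWStart w ≤ start1))).map pvWStart).getD start1
  let ne := if nearest_end - nearest_start < 12000 then min (pvOrI duration_ms (nearest_start + 12000)) (nearest_start + 12000) else nearest_end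
  (nearest_start, ne)

-- ===== PRECONDITION & SPEC =====
def Spec_align_window_py (words : List (List (String × Int))) (start_ms : Int) (end_ms : Int) (duration_ms : Int) (out : Int × Int) : Prop := out = align_window_py_alt words start_ms end_ms duration_ms
instance (words : List (List (String × Int))) (start_ms : Int) (end_ms : Int) (duration_ms : Int) (out : Int × Int) : Decidable (Spec_align_window_py words start_ms end_ms duration_ms out) := by unfold Spec_align_window_py; infer_instance

-- ===== CLAIM (what is proved, stated in full; the proofs are below) =====
def Claim_equal_align_window_py : Prop := ∀ (words : List (List (String × Int))) (start_ms : Int) (end_ms : Int) (duration_ms : Int), Dom_align_window_py words start_ms end_ms duration_ms → Spec_align_window_py words start_ms end_ms duration_ms (align_window_py words start_ms end_ms duration_ms)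

-- ===== LEMMAS AND PROOFS =====
def pvLastD (l : List Int) (d : Int) : Int := l.getLast?.getD d

theorem pvLastD_cons (a : Int) (l : List Int) (d : Int) : pvLastD (a :: l) d = pvLastD l a := by
  cases l with
  | nil => simp [pvLastD]
  | cons b t =>
    have h : (b :: t).getLast?.isSome := by simp
    obtain ⟨x, hx⟩ := Option.isSome_iff_exists.mp h
    simp [pvLastD, List.getLast?_cons_cons, hx]

-- A's loop computes the two last-match reductions over the takeWhile prefix
theorem pvLoopA_eq (s e : Int) (ws : List (List (String × Int))) (ns ne : Int) :
    pvLoopA s e ws ns ne =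
      (pvLastD (((ws.take ((ws.takeWhile (fun w => pvWEnd w ≤ e)).length + 1)).filter
          (fun w => pvWStart w ≤ s)).map pvWStart) ns,
       pvLastD ((ws.takeWhile (fun w => pvWEnd w ≤ e)).map pvWEnd) ne) := by
  induction ws generalizing ns ne with
  | nil => simp [pvLoopA, pvLastD]
  | cons w ws ih =>
    by_cases he : pvWEnd w ≤ e
    · by_cases hs : pvWStart w ≤ s <;>
        simp [pvLoopA, he, hs, ih, List.take_succ_cons, pvLastD_cons]
    · by_cases hs : pvWStart w ≤ s <;>
        simp [pvLoopA, he, hs, pvLastD]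

-- B's break index equals the takeWhile length
theorem cut_eq_takeWhile {α : Type} (l : List α) (p : α → Bool) :
    (l.findIdx? (fun w => !p w)).getD l.length = (l.takeWhile p).length := by
  induction l with
  | nil => simp
  | cons a t ih =>
    by_cases h : p a
    · simp [List.findIdx?_cons, h]
      cases hf : t.findIdx? (fun w => !p w) <;> simp [hf] at ih ⊢ <;> omega
    · simp [List.findIdx?_cons, h]

-- last element of the takeWhile prefix is the element at index length-1
theorem lastD_takeWhile {α : Type} (l : List α) (p : α → Bool) (f : α → Int) (d : Int) (x : α) :
    pvLastD ((l.takeWhile p).map f) d =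
      if (l.takeWhile p).length = 0 then d else f (l.getD ((l.takeWhile p).length - 1) x) := by
  induction l generalizing d with
  | nil => simp [pvLastD]
  | cons a t ih =>
    by_cases h : p a
    · simp only [List.takeWhile_cons, h, if_true, List.map_cons, pvLastD_cons, List.length_cons]
      rw [ih (f a)]
      rcases Nat.eq_zero_or_pos (t.takeWhile p).length with ht | ht
      · simp [ht, List.getD]
      · have h0 : ¬((t.takeWhile p).length = 0) := by omega
        have h1 : ¬((t.takeWhile p).length + 1 = 0) := by omega
        obtain ⟨k, hk⟩ : ∃ k, (t.takeWhile p).length = k + 1 := ⟨_, (Nat.succ_pred_eq_of_pos ht).symm⟩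
        simp [hk, List.getD]
    · simp [h, pvLastD]

-- last match of a filter = first match of the reversed list
theorem filter_getLast?_eq {α : Type} (l : List α) (q : α → Bool) :
    (l.filter q).getLast? = l.reverse.find? q := by
  induction l with
  | nil => simp
  | cons a t ih =>
    rw [List.filter_cons, List.reverse_cons, List.find?_append]
    by_cases h : q a
    · simp only [h, if_pos, List.find?]
      cases hf : (t.filter q).getLast? with
      | none =>
        have : t.filter q = [] := by
          cases hft : t.filter q with
          | nil => rfl
          | cons b s => rw [hft] at hf; simp [List.getLast?_eq_some_getLast] at hf
        rw [← ih, hf]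
        simp [this]
      | some b =>
        have hne : t.filter q ≠ [] := by
          intro hc; rw [hc] at hf; simp at hf
        rw [← ih, hf]
        have : (a :: t.filter q).getLast? = (t.filter q).getLast? := by
          cases hft : t.filter q with
          | nil => exact absurd hft hne
          | cons c s => simp [List.getLast?_cons_cons]
        rw [this, hf]
        simp
    · simp only [h, Bool.false_eq_true, if_false]
      rw [ih]
      cases hf : t.reverse.find? q <;> simp [List.find?, h]

-- pvLastD over a map via getLast?
theorem pvLastD_map {α : Type} (l : List α) (f : α → Int) (d : Int) :
    pvLastD (l.map f) d = ((l.getLast?).map f).getD d := by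
  simp [pvLastD, List.getLast?_map]

-- B's staged computation equals A's fused loop
theorem core_eq (ws : List (List (String × Int))) (s e : Int) :
    pvLoopA s e ws s e =
      ((((ws.take (((ws.findIdx? (fun w => decide (e < pvWEnd w))).getD ws.length) + 1)).reverse.find?
            (fun w => decide (pvWStart w ≤ s))).map pvWStart).getD s,
        if ((ws.findIdx? (fun w => decide (e < pvWEnd w))).getD ws.length) = 0 then e
        else pvWEnd (ws.getD (((ws.findIdx? (fun w => decide (e < pvWEnd w))).getD ws.length) - 1) [])) := by
  have hneg : (fun w : List (String × Int) => decide (e < pvWEnd w)) =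
      (fun w => ! decide (pvWEnd w ≤ e)) := by
    funext w
    by_cases h : pvWEnd w ≤ e
    · simp [h, not_lt.mpr h]
    · simp [h, lt_of_not_ge h]
  rw [pvLoopA_eq, hneg, cut_eq_takeWhile]
  refine Prod.ext ?_ ?_
  · rw [pvLastD_map, filter_getLast?_eq]
  · rw [lastD_takeWhile _ _ _ _ []]

-- ===== VERDICT (by name: the statement is the Claim_ definition above) =====
theorem align_window_py_spec : Claim_equal_align_window_py := by
  intro words start_ms end_ms duration_ms _
  unfold Spec_align_window_py align_window_py align_window_py_alt
  simp only [core_eq]
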